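-- pv_equiv track=rewrite | github.com/toku463ne/stockAnalyzer | lib/indicators.py | old2_zigzag
-- ===== SOURCE A (Python) =====
-- def old2_zigzag(ep, dt, h, l, size=5, peak_num=0):
--     peakidxs = []
--     newep = []
--     newdt = []
--     prices = []
--     dirs = []
--
--     def _updateZigZag(newdir, i, p):
--         olddir = 0
--         if len(peakidxs) > 0:
--             j = peakidxs[-1]
--             olddir = dirs[-1]
--             do_pop = False
--             if newdir == olddir:
--                 if newdir == 1:
--                     if p[i] > h[j]:
--                         do_pop = True
--                 else:
--                     if p[i] < l[j]:
--                         do_pop = True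
--                 if do_pop:
--                     dirs.pop()
--                     prices.pop()
--                     newdt.pop()
--                     newep.pop()
--                     peakidxs.pop()
--         if newdir != olddir or do_pop:
--             newdt.append(dt[i])
--             dirs.append(newdir)
--             prices.append(p[i])
--             newep.append(ep[i])
--             peakidxs.append(i)
--
--     for i in range(len(ep)-size*2+1, 0, -1):
--         midi = i + size - 1
--         midh = h[midi]
--         midl = l[midi]
--
--         if midh == max(h[i-1:i+size*2-2]):
--             _updateZigZag(1, midi, h)
--         if midl == min(l[i-1:i+size*2-2]):
--             _updateZigZag(-1, midi, l)
--
--         if peak_num > 0 and len(peakidxs) >= peak_num: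
--             break
--
--     date_start_index = size*2-1
--     newep.reverse()
--     newdt.reverse()
--     dirs.reverse()
--     prices.reverse()
--     return newep, newdt, dirs, prices, date_start_index
-- ===== SOURCE B (Python) =====
-- def _sliding(xs, w, agg):
--     # block-decomposition sliding-window extrema: O(n) total for all windows
--     n = len(xs)
--     pre = []
--     for j in range(n):
--         pre.append(xs[j] if j % w == 0 else agg(pre[-1], xs[j]))
--     suf = []
--     for j in range(n - 1, -1, -1):
--         suf.append(xs[j] if ((j + 1) % w == 0 or j == n - 1) else agg(suf[-1], xs[j]))
--     suf.reverse()
--     return [agg(suf[s], pre[s + w - 1]) for s in range(n - w + 1)]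
--
--
-- def old2_zigzag(ep, dt, h, l, size=5, peak_num=0):
--     n = len(ep)
--     date_start_index = 2 * size - 1
--     if n < 2 * size:
--         return [], [], [], [], date_start_index
--     w = 2 * size - 1
--     hi = _sliding(h, w, max)
--     lo = _sliding(l, w, min)
--     stack = []  # tuples (dir, price, ep, dt); price is h[midi] for dir 1, l[midi] for dir -1
--     for i in range(n - 2 * size + 1, 0, -1):
--         midi = i + size - 1
--         if h[midi] == hi[i - 1]:
--             _push(stack, 1, h[midi], ep[midi], dt[midi])
--         if l[midi] == lo[i - 1]:
--             _push(stack, -1, l[midi], ep[midi], dt[midi])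
--         if peak_num > 0 and len(stack) >= peak_num:
--             break
--     stack.reverse()
--     return ([t[2] for t in stack], [t[3] for t in stack],
--             [t[0] for t in stack], [t[1] for t in stack], date_start_index)
--
--
-- def _push(stack, d, price, e, s):
--     if stack and stack[-1][0] == d:
--         if not (price > stack[-1][1] if d == 1 else price < stack[-1][1]):
--             return
--         stack.pop()
--     stack.append((d, price, e, s))
-- ===== Notes on version B (the rewrite author's own statement) =====
-- stated objective: faster
-- what changed: B replaces A's per-position O(size) slice max()/min() scans by an O(n) block-decomposition sliding-window max/min precomputation and keeps the peaks on a single stack of (dir, price, ep, dt) tuples (the pop test compares against the stored price instead of re-indexing h/l), unzipping once at the end.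
import Mathlib
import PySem

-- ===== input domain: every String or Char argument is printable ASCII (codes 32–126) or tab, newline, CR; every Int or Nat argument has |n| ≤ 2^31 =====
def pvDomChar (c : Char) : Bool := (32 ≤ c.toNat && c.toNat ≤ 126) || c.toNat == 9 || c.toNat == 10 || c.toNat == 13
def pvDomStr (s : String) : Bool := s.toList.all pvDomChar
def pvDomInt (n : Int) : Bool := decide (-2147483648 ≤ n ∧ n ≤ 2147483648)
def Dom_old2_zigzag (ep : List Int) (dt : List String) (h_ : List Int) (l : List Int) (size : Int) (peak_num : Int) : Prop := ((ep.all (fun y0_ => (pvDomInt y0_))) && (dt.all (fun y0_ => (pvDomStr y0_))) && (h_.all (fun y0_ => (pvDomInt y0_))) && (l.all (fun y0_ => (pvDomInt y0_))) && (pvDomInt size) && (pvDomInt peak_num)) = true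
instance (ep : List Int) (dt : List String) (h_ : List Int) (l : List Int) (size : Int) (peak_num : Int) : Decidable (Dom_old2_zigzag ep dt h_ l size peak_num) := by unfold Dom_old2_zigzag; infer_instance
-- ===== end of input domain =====

-- B replaces A's per-position O(size) slice max/min by an O(n) block-decomposition
-- sliding-window extrema precomputation and keeps the peaks on one stack of tuples
-- (objective: faster, asymptotically O(n) instead of O(n*size)).

-- ===== PORT A =====
-- state: (peakidxs, newep, newdt, prices, dirs)
def pvAUpd (ep : List Int) (dt : List String) (h_ : List Int) (l : List Int)
    (newdir : Int) (i : Int) (p : List Int)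
    (st : List Int × List Int × List String × List Int × List Int) :
    List Int × List Int × List String × List Int × List Int :=
  let (pk, nep, ndt, pr, dr) := st
  let olddir : Int := if pk.length > 0 then PySem.List.pyGetD dr (-1) 0 else 0
  let j : Int := PySem.List.pyGetD pk (-1) 0
  let do_pop : Bool :=
    if pk.length > 0 ∧ newdir = olddir then
      (if newdir = 1 then decide (PySem.List.pyGetD p i 0 > PySem.List.pyGetD h_ j 0)
       else decide (PySem.List.pyGetD p i 0 < PySem.List.pyGetD l j 0))
    else false
  let pk1 := if do_pop then pk.dropLast else pk
  let nep1 := if do_pop then nep.dropLast else nep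
  let ndt1 := if do_pop then ndt.dropLast else ndt
  let pr1 := if do_pop then pr.dropLast else pr
  let dr1 := if do_pop then dr.dropLast else dr
  if newdir ≠ olddir ∨ do_pop then
    (pk1 ++ [i], nep1 ++ [PySem.List.pyGetD ep i 0], ndt1 ++ [PySem.List.pyGetD dt i ""],
     pr1 ++ [PySem.List.pyGetD p i 0], dr1 ++ [newdir])
  else (pk1, nep1, ndt1, pr1, dr1)

def pvALoop (ep : List Int) (dt : List String) (h_ : List Int) (l : List Int)
    (size : Int) (peak_num : Int) :
    List Int → (List Int × List Int × List String × List Int × List Int) →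
    List Int × List Int × List String × List Int × List Int
  | [], st => st
  | i :: rest, st =>
    let midi := i + size - 1
    let midh := PySem.List.pyGetD h_ midi 0
    let midl := PySem.List.pyGetD l midi 0
    let st1 := if PySem.List.max? (PySem.List.slice h_ (some (i-1)) (some (i+size*2-2))) (fun y => y) = some midh
               then pvAUpd ep dt h_ l 1 midi h_ st else st
    let st2 := if PySem.List.min? (PySem.List.slice l (some (i-1)) (some (i+size*2-2))) (fun y => y) = some midl
               then pvAUpd ep dt h_ l (-1) midi l st1 else st1
    if peak_num > 0 ∧ peak_num ≤ (st2.1.length : Int) then st2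
    else pvALoop ep dt h_ l size peak_num rest st2

def old2_zigzag (ep : List Int) (dt : List String) (h_ : List Int) (l : List Int) (size : Int) (peak_num : Int) : List Int × List String × List Int × List Int × Int :=
  let st := pvALoop ep dt h_ l size peak_num
      (PySem.List.pyRange ((ep.length : Int) - size*2 + 1) 0 (-1)) ([], [], [], [], [])
  (st.2.1.reverse, st.2.2.1.reverse, st.2.2.2.2.reverse, st.2.2.2.1.reverse, size*2 - 1)

-- ===== PORT B =====
def pvPreList (xs : List Int) (w : Int) (agg : Int → Int → Int) : List Int :=
  (PySem.List.pyRange 0 (xs.length : Int) 1).foldl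
    (fun pre j => pre ++ [if PySem.Int.mod j w = 0 then PySem.List.pyGetD xs j 0
                          else agg (PySem.List.pyGetD pre (-1) 0) (PySem.List.pyGetD xs j 0)]) []

def pvSufList (xs : List Int) (w : Int) (agg : Int → Int → Int) : List Int :=
  ((PySem.List.pyRange ((xs.length : Int) - 1) (-1) (-1)).foldl
    (fun suf j => suf ++ [if PySem.Int.mod (j+1) w = 0 ∨ j = (xs.length : Int) - 1 then PySem.List.pyGetD xs j 0
                          else agg (PySem.List.pyGetD suf (-1) 0) (PySem.List.pyGetD xs j 0)]) []).reverse

def pvSliding (xs : List Int) (w : Int) (agg : Int → Int → Int) : List Int :=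
  let pre := pvPreList xs w agg
  let suf := pvSufList xs w agg
  (PySem.List.pyRange 0 ((xs.length : Int) - w + 1) 1).map
    (fun s => agg (PySem.List.pyGetD suf s 0) (PySem.List.pyGetD pre (s + w - 1) 0))

-- stack element: (dir, price, ep, dt)
def pvPush (d : Int) (price : Int) (e : Int) (s : String)
    (st : List (Int × Int × Int × String)) : List (Int × Int × Int × String) :=
  match st.getLast? with
  | none => st ++ [(d, price, e, s)]
  | some t =>
    if t.1 = d then
      if (if d = 1 then decide (price > t.2.1) else decide (price < t.2.1)) then
        st.dropLast ++ [(d, price, e, s)]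
      else st
    else st ++ [(d, price, e, s)]

def pvBLoop (ep : List Int) (dt : List String) (h_ : List Int) (l : List Int)
    (size : Int) (peak_num : Int) (hi lo : List Int) :
    List Int → List (Int × Int × Int × String) → List (Int × Int × Int × String)
  | [], st => st
  | i :: rest, st =>
    let midi := i + size - 1
    let st1 := if PySem.List.pyGetD h_ midi 0 = PySem.List.pyGetD hi (i-1) 0 then
        pvPush 1 (PySem.List.pyGetD h_ midi 0) (PySem.List.pyGetD ep midi 0) (PySem.List.pyGetD dt midi "") st
      else st
    let st2 := if PySem.List.pyGetD l midi 0 = PySem.List.pyGetD lo (i-1) 0 then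
        pvPush (-1) (PySem.List.pyGetD l midi 0) (PySem.List.pyGetD ep midi 0) (PySem.List.pyGetD dt midi "") st1
      else st1
    if peak_num > 0 ∧ peak_num ≤ (st2.length : Int) then st2
    else pvBLoop ep dt h_ l size peak_num hi lo rest st2

def old2_zigzag_alt (ep : List Int) (dt : List String) (h_ : List Int) (l : List Int) (size : Int) (peak_num : Int) : List Int × List String × List Int × List Int × Int :=
  let n : Int := (ep.length : Int)
  let dsi : Int := 2*size - 1
  if n < 2*size then ([], [], [], [], dsi) else
  let w : Int := 2*size - 1
  let hi := pvSliding h_ w max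
  let lo := pvSliding l w min
  let st := pvBLoop ep dt h_ l size peak_num hi lo (PySem.List.pyRange (n - 2*size + 1) 0 (-1)) []
  let stR := st.reverse
  (stR.map (fun t => t.2.2.1), stR.map (fun t => t.2.2.2), stR.map (fun t => t.1), stR.map (fun t => t.2.1), dsi)

-- ===== PRECONDITION & SPEC =====
-- Pre_ requires the four parallel price/date series to have equal length whenever the
-- scan loop runs (as at every call site), and size ≥ 1; on shorter h/l/dt A either
-- raises IndexError or silently scans windows clamped by the series mismatch (see cites),
-- and on size ≤ 0 A always raises ValueError (max of an empty slice).
def Pre_old2_zigzag (ep : List Int) (dt : List String) (h_ : List Int) (l : List Int) (size : Int) (peak_num : Int) : Prop :=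
  1 ≤ size ∧ (2*size ≤ (ep.length : Int) → (dt.length = ep.length ∧ h_.length = ep.length ∧ l.length = ep.length))
instance (ep : List Int) (dt : List String) (h_ : List Int) (l : List Int) (size : Int) (peak_num : Int) : Decidable (Pre_old2_zigzag ep dt h_ l size peak_num) := by unfold Pre_old2_zigzag; infer_instance

def pvWitness_old2_zigzag : List Int × List String × List Int × List Int × Int × Int :=
  ([1, 2, 3, 4], ["a", "b", "c", "d"], [2, 3, 4, 5], [0, 1, 2, 3], 1, 0)

def Spec_old2_zigzag (ep : List Int) (dt : List String) (h_ : List Int) (l : List Int) (size : Int) (peak_num : Int) (out : List Int × List String × List Int × List Int × Int) : Prop := out = old2_zigzag_alt ep dt h_ l size peak_num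
instance (ep : List Int) (dt : List String) (h_ : List Int) (l : List Int) (size : Int) (peak_num : Int) (out : List Int × List String × List Int × List Int × Int) : Decidable (Spec_old2_zigzag ep dt h_ l size peak_num out) := by unfold Spec_old2_zigzag; infer_instance

-- ===== CLAIM (what is proved, stated in full; the proofs are below) =====
def Claim_equal_old2_zigzag : Prop := ∀ (ep : List Int) (dt : List String) (h_ : List Int) (l : List Int) (size : Int) (peak_num : Int), Dom_old2_zigzag ep dt h_ l size peak_num → Pre_old2_zigzag ep dt h_ l size peak_num → Spec_old2_zigzag ep dt h_ l size peak_num (old2_zigzag ep dt h_ l size peak_num)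


-- ===== LEMMAS AND PROOFS =====

-- ---- generic fold-of-a-segment machinery ----
def pvSeg (xs : List Int) (a len : Nat) : List Int := (xs.drop a).take len

def pvAggF (agg : Int → Int → Int) : List Int → Option Int
  | [] => none
  | x :: t => some (t.foldl agg x)

theorem pvFoldl_assoc (agg : Int → Int → Int)
    (hA : ∀ a b c, agg (agg a b) c = agg a (agg b c)) :
    ∀ (t : List Int) (x y : Int), t.foldl agg (agg x y) = agg x (t.foldl agg y) := by
  intro t
  induction t with
  | nil => intro x y; rfl
  | cons z t ih =>
    intro x y
    show t.foldl agg (agg (agg x y) z) = agg x ((z :: t).foldl agg y)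
    rw [hA, ih]
    rfl

theorem pvAggF_append (agg : Int → Int → Int)
    (hA : ∀ a b c, agg (agg a b) c = agg a (agg b c))
    (A B : List Int) (a b : Int)
    (ha : pvAggF agg A = some a) (hb : pvAggF agg B = some b) :
    pvAggF agg (A ++ B) = some (agg a b) := by
  cases A with
  | nil => simp [pvAggF] at ha
  | cons x t =>
    cases B with
    | nil => simp [pvAggF] at hb
    | cons y u =>
      simp only [pvAggF, Option.some.injEq] at ha hb ⊢
      subst ha; subst hb
      show some (List.foldl agg x (t ++ y :: u)) = _
      rw [List.foldl_append]
      show some (List.foldl agg (agg (List.foldl agg x t) y) u) = _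
      rw [pvFoldl_assoc agg hA]

theorem pvSeg_ne_nil (xs : List Int) (a len : Nat) (h1 : a < xs.length) (h2 : 1 ≤ len) :
    pvSeg xs a len ≠ [] := by
  have : (pvSeg xs a len).length = min len (xs.length - a) := by
    simp [pvSeg]
  intro hc
  rw [hc] at this
  simp at this
  omega

theorem pvAggF_getD_some (agg : Int → Int → Int) (L : List Int) (hL : L ≠ []) :
    pvAggF agg L = some ((pvAggF agg L).getD 0) := by
  cases L with
  | nil => exact absurd rfl hL
  | cons x t => rfl

-- ---- block decomposition specs ----
def pvBS (w' j : Nat) : Nat := w' * (j / w')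

def pvPreSpec (xs : List Int) (w' : Nat) (agg : Int → Int → Int) (j : Nat) : Int :=
  (pvAggF agg (pvSeg xs (pvBS w' j) (j + 1 - pvBS w' j))).getD 0

def pvSufSpec (xs : List Int) (w' : Nat) (agg : Int → Int → Int) (j : Nat) : Int :=
  (pvAggF agg (pvSeg xs j (min (pvBS w' j + w') xs.length - j))).getD 0

theorem pvBS_le (w' j : Nat) : pvBS w' j ≤ j := by
  calc w' * (j / w') = j / w' * w' := Nat.mul_comm _ _
  _ ≤ j := Nat.div_mul_le_self j w'

theorem pvBS_lt_add (w' j : Nat) (hw : 1 ≤ w') : j < pvBS w' j + w' := by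
  have h2 := Nat.div_add_mod j w'
  have h3 : j % w' < w' := Nat.mod_lt _ (by omega)
  unfold pvBS
  omega

theorem pvBS_succ_eq (w' k : Nat) (h : (k + 1) % w' ≠ 0) : pvBS w' (k + 1) = pvBS w' k := by
  unfold pvBS
  congr 1
  rw [Nat.succ_div]
  have : ¬ w' ∣ (k + 1) := fun hd => h (Nat.mod_eq_zero_of_dvd hd)
  simp [this]

theorem pvBS_eq_self (w' m : Nat) (hw : 1 ≤ w') (h : m % w' = 0) : pvBS w' m = m :=
  Nat.mul_div_cancel' (Nat.dvd_of_mod_eq_zero h)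

-- ---- pre list characterization ----
theorem pvPreList_eq (xs : List Int) (w : Int) (agg : Int → Int → Int)
    (hA : ∀ a b c, agg (agg a b) c = agg a (agg b c)) (hw : 1 ≤ w) :
    pvPreList xs w agg = (List.range xs.length).map (pvPreSpec xs w.toNat agg) := by
  have hwn : (1 : Nat) ≤ w.toNat := by omega
  have hcast : ((w.toNat : Nat) : Int) = w := Int.toNat_of_nonneg (by omega)
  suffices hgen : ∀ m : Nat, m ≤ xs.length →
      (PySem.List.pyRange 0 (m : Int) 1).foldl
        (fun pre j => pre ++ [if PySem.Int.mod j w = 0 then PySem.List.pyGetD xs j 0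
                              else agg (PySem.List.pyGetD pre (-1) 0) (PySem.List.pyGetD xs j 0)]) []
      = (List.range m).map (pvPreSpec xs w.toNat agg) by
    exact hgen xs.length le_rfl
  intro m
  induction m with
  | zero => intro _; simp [PySem.List.pyRange_one_eq_nil]
  | succ k ih =>
    intro hm
    have hk : k ≤ xs.length := by omega
    have hklt : k < xs.length := by omega
    have hrange : PySem.List.pyRange 0 ((k+1 : Nat) : Int) 1
        = PySem.List.pyRange 0 ((k : Nat) : Int) 1 ++ [((k : Nat) : Int)] := by
      push_cast
      exact PySem.List.pyRange_one_succ_right (by omega)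
    rw [hrange, List.foldl_append, ih hk]
    rw [List.range_succ, List.map_append]
    simp only [List.foldl_cons, List.foldl_nil, List.map_cons, List.map_nil]
    congr 1
    -- value at index k equals the spec
    have hmod : PySem.Int.mod ((k : Nat) : Int) w = (((k % w.toNat : Nat)) : Int) := by
      rw [← hcast]
      exact PySem.Int.mod_natCast k w.toNat
    have hget : PySem.List.pyGetD xs ((k : Nat) : Int) 0 = xs[k] := by
      rw [PySem.List.pyGetD_natCast, List.getD_eq_getElem xs 0 hklt]
    by_cases h0 : k % w.toNat = 0
    · rw [hmod]
      simp only [h0, Nat.cast_zero, if_pos rfl]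
      -- spec: window is the singleton [xs[k]]
      have hbs : pvBS w.toNat k = k := pvBS_eq_self _ _ hwn h0
      have hseg : pvSeg xs k 1 = [xs[k]] := by
        unfold pvSeg
        rw [List.drop_eq_getElem_cons hklt]
        rfl
      rw [hget]
      unfold pvPreSpec
      rw [hbs]
      simp only [Nat.add_sub_cancel_left, Nat.add_sub_cancel]
      rw [hseg]
      simp [pvAggF]
    · rw [hmod]
      have hne : ¬ (((k % w.toNat : Nat)) : Int) = 0 := by
        simp only [Nat.cast_eq_zero]
        exact h0
      rw [if_neg hne]
      have hkpos : k ≠ 0 := by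
        intro hzz
        subst hzz
        simp at h0
      obtain ⟨k', rfl⟩ : ∃ k', k = k' + 1 := ⟨k - 1, by omega⟩
      -- previous accumulated value
      have hprev : PySem.List.pyGetD ((List.range (k'+1)).map (pvPreSpec xs w.toNat agg)) (-1) 0
          = pvPreSpec xs w.toNat agg k' := by
        rw [List.range_succ, List.map_append]
        exact PySem.List.pyGetD_neg_one_append_singleton _ _ _
      rw [hprev, hget]
      -- spec step
      have hbs : pvBS w.toNat (k'+1) = pvBS w.toNat k' := pvBS_succ_eq _ _ h0
      have hble : pvBS w.toNat k' ≤ k' := pvBS_le _ _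
      have hk'lt : k' < xs.length := by omega
      have hsome : pvAggF agg (pvSeg xs (pvBS w.toNat k') (k' + 1 - pvBS w.toNat k'))
          = some (pvPreSpec xs w.toNat agg k') := by
        unfold pvPreSpec
        exact pvAggF_getD_some agg _
          (pvSeg_ne_nil xs (pvBS w.toNat k') (k' + 1 - pvBS w.toNat k') (by omega) (by omega))
      have hsplit : pvSeg xs (pvBS w.toNat k') (k' + 1 + 1 - pvBS w.toNat k')
          = pvSeg xs (pvBS w.toNat k') (k' + 1 - pvBS w.toNat k') ++ [xs[k'+1]] := by
        unfold pvSeg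
        have h1 : k' + 1 + 1 - pvBS w.toNat k' = (k' + 1 - pvBS w.toNat k') + 1 := by omega
        rw [h1, List.take_succ]
        congr 1
        have h2 : (xs.drop (pvBS w.toNat k'))[k' + 1 - pvBS w.toNat k']? = xs[pvBS w.toNat k' + (k' + 1 - pvBS w.toNat k')]? := by
          rw [List.getElem?_drop]
        rw [h2]
        have h3 : pvBS w.toNat k' + (k' + 1 - pvBS w.toNat k') = k' + 1 := by omega
        rw [h3, List.getElem?_eq_getElem hklt]
        rfl
      unfold pvPreSpec
      rw [hbs, hsplit]
      rw [pvAggF_append agg hA _ _ _ _ hsome rfl]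
      rfl

theorem pvAggF_cons (agg : Int → Int → Int)
    (hA : ∀ a b c, agg (agg a b) c = agg a (agg b c))
    (x : Int) (L : List Int) (v : Int) (h : pvAggF agg L = some v) :
    pvAggF agg (x :: L) = some (agg x v) := by
  have := pvAggF_append agg hA [x] L x v rfl h
  rwa [List.singleton_append] at this

theorem pvSufSpec_val (xs : List Int) (w' : Nat) (agg : Int → Int → Int)
    (hA : ∀ a b c, agg (agg a b) c = agg a (agg b c))
    (hC : ∀ a b, agg a b = agg b a)
    (hw : 1 ≤ w') (m : Nat) (hm : m < xs.length) (accv : Int)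
    (hacc : m = xs.length - 1 ∨ accv = pvSufSpec xs w' agg (m+1)) :
    (if (m+1) % w' = 0 ∨ m = xs.length - 1 then xs.getD m 0 else agg accv (xs.getD m 0))
      = pvSufSpec xs w' agg m := by
  by_cases hc : (m+1) % w' = 0 ∨ m = xs.length - 1
  · rw [if_pos hc]
    have hmin : min (pvBS w' m + w') xs.length = m + 1 := by
      rcases hc with h1 | h2
      · obtain ⟨q', hq⟩ := Nat.dvd_of_mod_eq_zero h1
        have hq1 : q' ≠ 0 := by
          intro hz
          rw [hz, Nat.mul_zero] at hq
          omega
        have hA1 : w' * (q' - 1) = (m+1) - w' := by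
          rw [Nat.mul_sub, Nat.mul_one, ← hq]
        have hle : w' ≤ w' * q' := Nat.le_mul_of_pos_right w' (by omega)
        have hdiv : m / w' = q' - 1 := by
          have hm2 : m = w' * (q' - 1) + (w' - 1) := by omega
          rw [hm2, Nat.mul_add_div (by omega)]
          have h9 : (w' - 1) / w' = 0 := Nat.div_eq_of_lt (by omega)
          omega
        unfold pvBS
        rw [hdiv]
        omega
      · have := pvBS_lt_add w' m hw
        omega
    unfold pvSufSpec
    rw [hmin]
    have h1 : m + 1 - m = 1 := by omega
    rw [h1]
    have hseg : pvSeg xs m 1 = [xs[m]] := by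
      unfold pvSeg
      rw [List.drop_eq_getElem_cons hm]
      rfl
    rw [hseg, List.getD_eq_getElem xs 0 hm]
    rfl
  · rw [if_neg hc]
    push_neg at hc
    obtain ⟨hc1, hc2⟩ := hc
    have hmlt : m + 1 < xs.length := by omega
    have h2 : accv = pvSufSpec xs w' agg (m+1) := by
      rcases hacc with h1 | h2
      · exact absurd h1 hc2
      · exact h2
    have hbs : pvBS w' (m+1) = pvBS w' m := pvBS_succ_eq _ _ hc1
    have hgt := pvBS_lt_add w' m hw
    have hne : pvBS w' m + w' ≠ m + 1 := by
      intro hq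
      apply hc1
      have h4 : w' * (m / w') + w' = w' * (m / w' + 1) := by ring
      have h5 : (m + 1) % w' = (w' * (m / w' + 1)) % w' := by
        rw [← h4]
        unfold pvBS at hq
        rw [hq]
      rw [h5, Nat.mul_mod_right]
    have hegt : m + 1 < min (pvBS w' m + w') xs.length := by omega
    have hsome : pvAggF agg (pvSeg xs (m+1) (min (pvBS w' m + w') xs.length - (m+1)))
        = some (pvSufSpec xs w' agg (m+1)) := by
      unfold pvSufSpec
      rw [hbs]
      exact pvAggF_getD_some agg _ (pvSeg_ne_nil xs (m+1) _ hmlt (by omega))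
    have hsplit : pvSeg xs m (min (pvBS w' m + w') xs.length - m)
        = xs.getD m 0 :: pvSeg xs (m+1) (min (pvBS w' m + w') xs.length - (m+1)) := by
      unfold pvSeg
      rw [List.drop_eq_getElem_cons hm]
      have h3 : min (pvBS w' m + w') xs.length - m
          = (min (pvBS w' m + w') xs.length - (m+1)) + 1 := by omega
      rw [h3, List.take_succ_cons, List.getD_eq_getElem xs 0 hm]
    unfold pvSufSpec
    rw [hsplit, pvAggF_cons agg hA _ _ _ hsome]
    rw [h2]
    simp only [Option.getD_some]
    exact hC _ _

-- ---- suf list characterization ----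
theorem pvSufList_eq (xs : List Int) (w : Int) (agg : Int → Int → Int)
    (hA : ∀ a b c, agg (agg a b) c = agg a (agg b c))
    (hC : ∀ a b, agg a b = agg b a) (hw : 1 ≤ w) :
    pvSufList xs w agg = (List.range xs.length).map (pvSufSpec xs w.toNat agg) := by
  have hwn : (1 : Nat) ≤ w.toNat := by omega
  have hcast : ((w.toNat : Nat) : Int) = w := Int.toNat_of_nonneg (by omega)
  rcases Nat.eq_zero_or_pos xs.length with hn0 | hnpos
  · unfold pvSufList
    rw [hn0]
    simp [PySem.List.pyRange_neg_one_eq_nil]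
  · have aux : ∀ m : Nat, m < xs.length → ∀ acc : List Int,
        (m = xs.length - 1 ∨ PySem.List.pyGetD acc (-1) 0 = pvSufSpec xs w.toNat agg (m+1)) →
        (PySem.List.pyRange ((m : Nat) : Int) (-1) (-1)).foldl
          (fun suf j => suf ++ [if PySem.Int.mod (j+1) w = 0 ∨ j = (xs.length : Int) - 1 then PySem.List.pyGetD xs j 0
                                else agg (PySem.List.pyGetD suf (-1) 0) (PySem.List.pyGetD xs j 0)]) acc
        = acc ++ ((List.range (m+1)).map (pvSufSpec xs w.toNat agg)).reverse := by
      intro m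
      induction m with
      | zero =>
        intro hm acc hacc
        rw [PySem.List.pyRange_neg_one_cons (by omega)]
        rw [show ((0:Nat):Int) - 1 = -1 by omega]
        rw [show PySem.List.pyRange (-1) (-1) (-1) = [] from PySem.List.pyRange_neg_one_eq_nil (by omega)]
        simp only [List.foldl_cons, List.foldl_nil]
        congr 1
        have hv := pvSufSpec_val xs w.toNat agg hA hC hwn 0 hm _ hacc
        have hm1 : PySem.Int.mod (((0:Nat):Int)+1) w = (((0+1) % w.toNat : Nat) : Int) := by
          rw [show (((0:Nat):Int)+1) = (((0+1:Nat)):Int) by simp]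
          conv_lhs => rw [← hcast]
          rw [PySem.Int.mod_natCast]
        have hcond : (PySem.Int.mod (((0:Nat):Int)+1) w = 0 ∨ ((0:Nat):Int) = (xs.length : Int) - 1)
            ↔ ((0+1) % w.toNat = 0 ∨ 0 = xs.length - 1) := by
          rw [hm1]
          omega
        have hget : PySem.List.pyGetD xs ((0:Nat):Int) 0 = xs.getD 0 0 := by
          rw [PySem.List.pyGetD_natCast]
        have hnorm : ((List.range (0+1)).map (pvSufSpec xs w.toNat agg)).reverse
            = [pvSufSpec xs w.toNat agg 0] := by simp
        rw [hnorm, ← hv]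
        by_cases hcc : (0+1) % w.toNat = 0 ∨ 0 = xs.length - 1
        · rw [if_pos (hcond.mpr hcc), if_pos hcc, hget]
        · rw [if_neg (fun hx => hcc (hcond.mp hx)), if_neg hcc, hget]
      | succ k ih =>
        intro hm acc hacc
        rw [PySem.List.pyRange_neg_one_cons (by omega)]
        simp only [List.foldl_cons]
        have hv := pvSufSpec_val xs w.toNat agg hA hC hwn (k+1) hm _ hacc
        have hm1 : PySem.Int.mod (((k+1:Nat):Int)+1) w = (((k+1+1) % w.toNat : Nat) : Int) := by
          rw [show (((k+1:Nat):Int)+1) = (((k+1+1:Nat)):Int) by push_cast; ring]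
          conv_lhs => rw [← hcast]
          rw [PySem.Int.mod_natCast]
        have hcond : (PySem.Int.mod (((k+1:Nat):Int)+1) w = 0 ∨ ((k+1:Nat):Int) = (xs.length : Int) - 1)
            ↔ ((k+1+1) % w.toNat = 0 ∨ k+1 = xs.length - 1) := by
          rw [hm1]
          omega
        have hget : PySem.List.pyGetD xs ((k+1:Nat):Int) 0 = xs.getD (k+1) 0 := by
          rw [PySem.List.pyGetD_natCast]
        have hval : (if PySem.Int.mod (((k+1:Nat):Int)+1) w = 0 ∨ ((k+1:Nat):Int) = (xs.length : Int) - 1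
              then PySem.List.pyGetD xs ((k+1:Nat):Int) 0
              else agg (PySem.List.pyGetD acc (-1) 0) (PySem.List.pyGetD xs ((k+1:Nat):Int) 0))
            = pvSufSpec xs w.toNat agg (k+1) := by
          rw [← hv]
          by_cases hcc : (k+1+1) % w.toNat = 0 ∨ k+1 = xs.length - 1
          · rw [if_pos (hcond.mpr hcc), if_pos hcc, hget]
          · rw [if_neg (fun hx => hcc (hcond.mp hx)), if_neg hcc, hget]
        rw [hval]
        rw [show ((k+1:Nat):Int) - 1 = ((k:Nat):Int) by push_cast; ring]
        rw [ih (by omega) (acc ++ [pvSufSpec xs w.toNat agg (k+1)])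
            (Or.inr (PySem.List.pyGetD_neg_one_append_singleton _ _ _))]
        rw [List.append_assoc]
        congr 1
        rw [List.range_succ (n := k+1), List.map_append, List.reverse_append]
        rfl
    unfold pvSufList
    have haux := aux (xs.length - 1) (by omega) [] (Or.inl rfl)
    rw [show ((xs.length - 1 : Nat) : Int) = (xs.length : Int) - 1 by omega] at haux
    rw [haux, show xs.length - 1 + 1 = xs.length by omega]
    simp

theorem pvSeg_split (xs : List Int) (s a b : Nat) :
    pvSeg xs s (a + b) = pvSeg xs s a ++ pvSeg xs (s + a) b := by
  unfold pvSeg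
  rw [List.take_add]
  congr 1
  rw [List.drop_drop]

-- ---- window combine ----
theorem pvCombine (xs : List Int) (w' : Nat) (agg : Int → Int → Int)
    (hA : ∀ a b c, agg (agg a b) c = agg a (agg b c))
    (hI : ∀ a, agg a a = a)
    (hw : 1 ≤ w') (s : Nat) (hs : s + w' ≤ xs.length) :
    pvAggF agg (pvSeg xs s w') =
      some (agg (pvSufSpec xs w' agg s) (pvPreSpec xs w' agg (s + w' - 1))) := by
  have hslt : s < xs.length := by omega
  by_cases h0 : s % w' = 0
  · -- window starts at a block boundary: suf and pre both cover the whole window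
    have hbss : pvBS w' s = s := pvBS_eq_self _ _ hw h0
    have hq : w' * (s / w') = s := Nat.mul_div_cancel' (Nat.dvd_of_mod_eq_zero h0)
    have hdiv : (s + w' - 1) / w' = s / w' + (w' - 1) / w' := by
      have hm2 : s + w' - 1 = w' * (s / w') + (w' - 1) := by omega
      rw [hm2, Nat.mul_add_div (by omega)]
    have h9 : (w' - 1) / w' = 0 := Nat.div_eq_of_lt (by omega)
    have hbse : pvBS w' (s + w' - 1) = s := by
      unfold pvBS
      rw [hdiv, h9, Nat.add_zero, hq]
    have hsuf : pvSufSpec xs w' agg s = (pvAggF agg (pvSeg xs s w')).getD 0 := by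
      unfold pvSufSpec
      rw [hbss, show min (s + w') xs.length - s = w' by omega]
    have hpre : pvPreSpec xs w' agg (s + w' - 1) = (pvAggF agg (pvSeg xs s w')).getD 0 := by
      unfold pvPreSpec
      rw [hbse, show s + w' - 1 + 1 - s = w' by omega]
    rw [hsuf, hpre, hI]
    exact pvAggF_getD_some agg _ (pvSeg_ne_nil xs s w' hslt (by omega))
  · -- window spans two adjacent blocks
    have hdm := Nat.div_add_mod s w'
    have hrlt : s % w' < w' := Nat.mod_lt _ (by omega)
    have hbsle := pvBS_le w' s
    have hmul : w' * (s / w' + 1) = w' * (s / w') + w' := by ring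
    have hdiv : (s + w' - 1) / w' = s / w' + 1 := by
      have hm2 : s + w' - 1 = w' * (s / w' + 1) + (s % w' - 1) := by
        unfold pvBS at hbsle
        omega
      rw [hm2, Nat.mul_add_div (by omega)]
      have h9 : (s % w' - 1) / w' = 0 := Nat.div_eq_of_lt (by omega)
      omega
    have hbse : pvBS w' (s + w' - 1) = pvBS w' s + w' := by
      unfold pvBS
      rw [hdiv, hmul]
    have hbs2 : pvBS w' s = s - s % w' := by
      unfold pvBS
      omega
    have hsuf : pvAggF agg (pvSeg xs s (pvBS w' s + w' - s)) = some (pvSufSpec xs w' agg s) := by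
      unfold pvSufSpec
      rw [show min (pvBS w' s + w') xs.length = pvBS w' s + w' by omega]
      exact pvAggF_getD_some agg _ (pvSeg_ne_nil xs s _ hslt (by omega))
    have hpre : pvAggF agg (pvSeg xs (pvBS w' s + w') (s % w'))
        = some (pvPreSpec xs w' agg (s + w' - 1)) := by
      unfold pvPreSpec
      rw [hbse, show s + w' - 1 + 1 - (pvBS w' s + w') = s % w' by omega]
      exact pvAggF_getD_some agg _ (pvSeg_ne_nil xs _ _ (by omega) (by omega))
    have hsplit : pvSeg xs s w' = pvSeg xs s (pvBS w' s + w' - s) ++ pvSeg xs (pvBS w' s + w') (s % w') := by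
      have h := pvSeg_split xs s (pvBS w' s + w' - s) (s % w')
      rw [show pvBS w' s + w' - s + s % w' = w' by omega] at h
      rw [show s + (pvBS w' s + w' - s) = pvBS w' s + w' by omega] at h
      exact h
    rw [hsplit]
    exact pvAggF_append agg hA _ _ _ _ (by rw [hsuf]) (by rw [hpre])

theorem pvSliding_spec (xs : List Int) (w : Int) (agg : Int → Int → Int)
    (hA : ∀ a b c, agg (agg a b) c = agg a (agg b c))
    (hC : ∀ a b, agg a b = agg b a)
    (hI : ∀ a, agg a a = a)
    (hw : 1 ≤ w) (s : Nat) (hs : s + w.toNat ≤ xs.length) :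
    pvAggF agg (pvSeg xs s w.toNat) =
      some (PySem.List.pyGetD (pvSliding xs w agg) (s : Int) 0) := by
  have hwn : (1 : Nat) ≤ w.toNat := by omega
  have hcast : ((w.toNat : Nat) : Int) = w := Int.toNat_of_nonneg (by omega)
  show pvAggF agg (pvSeg xs s w.toNat) = _
  rw [pvSliding]
  have hlt : ((s : Nat) : Int) < (xs.length : Int) - w + 1 := by omega
  rw [PySem.List.pyGetD_map_pyRange_of_nonneg _ _ _ _ (by omega) hlt]
  rw [pvSufList_eq xs w agg hA hC hw, pvPreList_eq xs w agg hA hw]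
  have hidx : ((s : Nat) : Int) + w - 1 = (((s + w.toNat - 1 : Nat)) : Int) := by omega
  rw [hidx]
  rw [PySem.List.pyGetD_natCast, PySem.List.pyGetD_natCast]
  rw [List.getD_eq_getElem _ _ (by simp; omega), List.getD_eq_getElem _ _ (by simp; omega)]
  simp only [List.getElem_map, List.getElem_range]
  exact pvCombine xs w.toNat agg hA hI hwn s hs

theorem pvMax?_eq_aggF (L : List Int) :
    PySem.List.max? L (fun y => y) = pvAggF max L := by
  cases L with
  | nil => simp [pvAggF, PySem.List.max?_eq_none_iff]
  | cons x t => rw [PySem.List.max?_id_cons]; rfl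

theorem pvMin?_eq_aggF (L : List Int) :
    PySem.List.min? L (fun y => y) = pvAggF min L := by
  cases L with
  | nil => simp [pvAggF, PySem.List.min?_eq_none_iff]
  | cons x t => rw [PySem.List.min?_id_cons]; rfl

-- ---- ghost-stack relation between A's parallel lists and B's tuple stack ----
def pvP (h_ l : List Int) (q : Int × (Int × Int × Int × String)) : Prop :=
  (q.2.1 = 1 ∨ q.2.1 = -1) ∧
  q.2.2.1 = (if q.2.1 = 1 then PySem.List.pyGetD h_ q.1 0 else PySem.List.pyGetD l q.1 0)

def pvA (gs : List (Int × (Int × Int × Int × String))) :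
    List Int × List Int × List String × List Int × List Int :=
  (gs.map (fun q => q.1), gs.map (fun q => q.2.2.2.1), gs.map (fun q => q.2.2.2.2),
   gs.map (fun q => q.2.2.1), gs.map (fun q => q.2.1))

theorem pvUpd_push (ep : List Int) (dt : List String) (h_ l : List Int)
    (d i : Int) (hd : d = 1 ∨ d = -1) (p : List Int)
    (hp : p = if d = 1 then h_ else l)
    (gs : List (Int × (Int × Int × Int × String))) (hgs : ∀ q ∈ gs, pvP h_ l q) :
    ∃ gs', (∀ q ∈ gs', pvP h_ l q) ∧
      pvAUpd ep dt h_ l d i p (pvA gs) = pvA gs' ∧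
      pvPush d (PySem.List.pyGetD p i 0) (PySem.List.pyGetD ep i 0)
        (PySem.List.pyGetD dt i "") (gs.map (fun q => q.2)) = gs'.map (fun q => q.2) := by
  have hd0 : ¬ d = (0:Int) := by rcases hd with rfl | rfl <;> decide
  have hnewP : pvP h_ l (i, (d, PySem.List.pyGetD p i 0, PySem.List.pyGetD ep i 0, PySem.List.pyGetD dt i "")) := by
    refine ⟨hd, ?_⟩
    rcases hd with rfl | rfl <;> simp [hp]
  rcases List.eq_nil_or_concat gs with rfl | ⟨gs0, q, rfl⟩
  · refine ⟨[(i, (d, PySem.List.pyGetD p i 0, PySem.List.pyGetD ep i 0, PySem.List.pyGetD dt i ""))], ?_, ?_, ?_⟩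
    · intro q hq
      rw [List.mem_singleton] at hq
      subst hq
      exact hnewP
    · simp [pvAUpd, pvA, hd0]
    · simp [pvPush, pvA]
  · simp only [List.concat_eq_append] at hgs ⊢
    have hq := hgs q (by simp)
    by_cases hdq : q.2.1 = d
    · -- same direction as the previous peak
      have hprice : (if d = 1 then PySem.List.pyGetD h_ q.1 0 else PySem.List.pyGetD l q.1 0) = q.2.2.1 := by
        rw [← hdq, ← hq.2]
      by_cases htest : (if d = 1 then decide (q.2.2.1 < PySem.List.pyGetD p i 0)
          else decide (PySem.List.pyGetD p i 0 < q.2.2.1)) = true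
      · -- pop the previous peak, then push
        refine ⟨gs0 ++ [(i, (d, PySem.List.pyGetD p i 0, PySem.List.pyGetD ep i 0, PySem.List.pyGetD dt i ""))], ?_, ?_, ?_⟩
        · intro q' hq'
          rcases List.mem_append.mp hq' with h | h
          · exact hgs q' (List.mem_append_left _ h)
          · rw [List.mem_singleton] at h
            subst h
            exact hnewP
        · rcases hd with rfl | rfl
          · rw [if_pos rfl] at hprice
            rw [if_pos rfl] at htest
            simp [pvAUpd, pvA, PySem.List.pyGetD_neg_one_append_singleton, hdq, hprice, htest,
              List.dropLast_concat]
          · rw [if_neg (by decide)] at hprice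
            rw [if_neg (by decide)] at htest
            simp [pvAUpd, pvA, PySem.List.pyGetD_neg_one_append_singleton, hdq, hprice, htest,
              List.dropLast_concat]
        · simp only [pvPush, List.map_append, List.map_cons, List.map_nil, List.getLast?_concat]
          rw [if_pos hdq]
          rw [if_pos (by
            rcases hd with rfl | rfl
            · rw [if_pos rfl]
              simpa using htest
            · rw [if_neg (by decide)]
              simpa using htest)]
          simp
      · -- same direction, not a higher/lower extreme: keep the stack unchanged
        refine ⟨gs0 ++ [q], ?_, ?_, ?_⟩
        · exact hgs
        · rcases hd with rfl | rfl
          · rw [if_pos rfl] at hprice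
            rw [if_pos rfl] at htest
            simp [pvAUpd, pvA, PySem.List.pyGetD_neg_one_append_singleton, hdq, hprice, htest]
          · rw [if_neg (by decide)] at hprice
            rw [if_neg (by decide)] at htest
            simp [pvAUpd, pvA, PySem.List.pyGetD_neg_one_append_singleton, hdq, hprice, htest]
        · simp only [pvPush, List.map_append, List.map_cons, List.map_nil, List.getLast?_concat]
          rw [if_pos hdq]
          rw [if_neg (by
            rcases hd with rfl | rfl
            · rw [if_pos rfl]
              simpa using htest
            · rw [if_neg (by decide)]
              simpa using htest)]
    · -- direction changed: push on top
      refine ⟨(gs0 ++ [q]) ++ [(i, (d, PySem.List.pyGetD p i 0, PySem.List.pyGetD ep i 0, PySem.List.pyGetD dt i ""))], ?_, ?_, ?_⟩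
      · intro q' hq'
        rcases List.mem_append.mp hq' with h | h
        · exact hgs q' h
        · rw [List.mem_singleton] at h
          subst h
          exact hnewP
      · have hne : ¬ d = q.2.1 := fun h => hdq h.symm
        simp [pvAUpd, pvA, PySem.List.pyGetD_neg_one_append_singleton, hne]
      · simp only [pvPush, List.map_append, List.map_cons, List.map_nil, List.getLast?_concat]
        rw [if_neg hdq]

theorem pvLoop_rel (ep : List Int) (dt : List String) (h_ l : List Int)
    (size peak_num : Int) (hsz : 1 ≤ size)
    (hh : h_.length = ep.length) (hl : l.length = ep.length) :
    ∀ (is : List Int), (∀ i ∈ is, 1 ≤ i ∧ i + 2*size - 2 ≤ (ep.length : Int) - 1) →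
    ∀ gs, (∀ q ∈ gs, pvP h_ l q) →
    ∃ gs', (∀ q ∈ gs', pvP h_ l q) ∧
      pvALoop ep dt h_ l size peak_num is (pvA gs) = pvA gs' ∧
      pvBLoop ep dt h_ l size peak_num (pvSliding h_ (2*size-1) max) (pvSliding l (2*size-1) min)
        is (gs.map (fun q => q.2)) = gs'.map (fun q => q.2) := by
  intro is
  induction is with
  | nil =>
    intro _ gs hgs
    exact ⟨gs, hgs, rfl, rfl⟩
  | cons i rest ih =>
    intro hmem gs hgs
    obtain ⟨hi1, hi2⟩ := hmem i (by simp)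
    have hrest : ∀ j ∈ rest, 1 ≤ j ∧ j + 2*size - 2 ≤ (ep.length : Int) - 1 :=
      fun j hj => hmem j (by simp [hj])
    have hwpos : (1:Int) ≤ 2*size - 1 := by omega
    have hcast1 : (((i-1).toNat : Nat) : Int) = i - 1 := Int.toNat_of_nonneg (by omega)
    have hsh : (i-1).toNat + (2*size-1).toNat ≤ h_.length := by omega
    have hsl_h := pvSliding_spec h_ (2*size-1) max (fun a b c => max_assoc a b c)
        (fun a b => max_comm a b) (fun a => max_self a) hwpos (i-1).toNat hsh
    rw [hcast1] at hsl_h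
    have hsl : (i-1).toNat + (2*size-1).toNat ≤ l.length := by omega
    have hsl_l := pvSliding_spec l (2*size-1) min (fun a b c => min_assoc a b c)
        (fun a b => min_comm a b) (fun a => min_self a) hwpos (i-1).toNat hsl
    rw [hcast1] at hsl_l
    have hsliceh : PySem.List.slice h_ (some (i-1)) (some (i+size*2-2))
        = pvSeg h_ (i-1).toNat (2*size-1).toNat := by
      rw [PySem.List.slice_toNat h_ (by omega) (by omega)]
      unfold pvSeg
      congr 1
      omega
    have hslicel : PySem.List.slice l (some (i-1)) (some (i+size*2-2))
        = pvSeg l (i-1).toNat (2*size-1).toNat := by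
      rw [PySem.List.slice_toNat l (by omega) (by omega)]
      unfold pvSeg
      congr 1
      omega
    have hch : (PySem.List.max? (PySem.List.slice h_ (some (i-1)) (some (i+size*2-2))) (fun y => y)
          = some (PySem.List.pyGetD h_ (i+size-1) 0))
        ↔ PySem.List.pyGetD h_ (i+size-1) 0
          = PySem.List.pyGetD (pvSliding h_ (2*size-1) max) (i-1) 0 := by
      rw [pvMax?_eq_aggF, hsliceh, hsl_h]
      simp [eq_comm]
    have hcl : (PySem.List.min? (PySem.List.slice l (some (i-1)) (some (i+size*2-2))) (fun y => y)
          = some (PySem.List.pyGetD l (i+size-1) 0))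
        ↔ PySem.List.pyGetD l (i+size-1) 0
          = PySem.List.pyGetD (pvSliding l (2*size-1) min) (i-1) 0 := by
      rw [pvMin?_eq_aggF, hslicel, hsl_l]
      simp [eq_comm]
    obtain ⟨gs1, h1P, hA1, hB1⟩ : ∃ gs1, (∀ q ∈ gs1, pvP h_ l q) ∧
        ((if PySem.List.max? (PySem.List.slice h_ (some (i-1)) (some (i+size*2-2))) (fun y => y)
            = some (PySem.List.pyGetD h_ (i+size-1) 0)
          then pvAUpd ep dt h_ l 1 (i+size-1) h_ (pvA gs) else pvA gs) = pvA gs1) ∧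
        ((if PySem.List.pyGetD h_ (i+size-1) 0
            = PySem.List.pyGetD (pvSliding h_ (2*size-1) max) (i-1) 0
          then pvPush 1 (PySem.List.pyGetD h_ (i+size-1) 0) (PySem.List.pyGetD ep (i+size-1) 0)
            (PySem.List.pyGetD dt (i+size-1) "") (gs.map (fun q => q.2))
          else gs.map (fun q => q.2)) = gs1.map (fun q => q.2)) := by
      by_cases hc1 : PySem.List.pyGetD h_ (i+size-1) 0
          = PySem.List.pyGetD (pvSliding h_ (2*size-1) max) (i-1) 0
      · obtain ⟨gs1, hP, hA', hB'⟩ := pvUpd_push ep dt h_ l 1 (i+size-1) (Or.inl rfl) h_ (by simp) gs hgs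
        exact ⟨gs1, hP, by rw [if_pos (hch.mpr hc1)]; exact hA', by rw [if_pos hc1]; exact hB'⟩
      · exact ⟨gs, hgs, by rw [if_neg (fun h => hc1 (hch.mp h))], by rw [if_neg hc1]⟩
    obtain ⟨gs2, h2P, hA2, hB2⟩ : ∃ gs2, (∀ q ∈ gs2, pvP h_ l q) ∧
        ((if PySem.List.min? (PySem.List.slice l (some (i-1)) (some (i+size*2-2))) (fun y => y)
            = some (PySem.List.pyGetD l (i+size-1) 0)
          then pvAUpd ep dt h_ l (-1) (i+size-1) l (pvA gs1) else pvA gs1) = pvA gs2) ∧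
        ((if PySem.List.pyGetD l (i+size-1) 0
            = PySem.List.pyGetD (pvSliding l (2*size-1) min) (i-1) 0
          then pvPush (-1) (PySem.List.pyGetD l (i+size-1) 0) (PySem.List.pyGetD ep (i+size-1) 0)
            (PySem.List.pyGetD dt (i+size-1) "") (gs1.map (fun q => q.2))
          else gs1.map (fun q => q.2)) = gs2.map (fun q => q.2)) := by
      by_cases hc2 : PySem.List.pyGetD l (i+size-1) 0
          = PySem.List.pyGetD (pvSliding l (2*size-1) min) (i-1) 0
      · obtain ⟨gs2, hP, hA', hB'⟩ := pvUpd_push ep dt h_ l (-1) (i+size-1) (Or.inr rfl) l (by norm_num) gs1 h1P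
        exact ⟨gs2, hP, by rw [if_pos (hcl.mpr hc2)]; exact hA', by rw [if_pos hc2]; exact hB'⟩
      · exact ⟨gs1, h1P, by rw [if_neg (fun h => hc2 (hcl.mp h))], by rw [if_neg hc2]⟩
    simp only [pvALoop, pvBLoop]
    rw [hA1, hA2, hB1, hB2]
    have hlenA : ((pvA gs2).1.length : Int) = (gs2.length : Int) := by
      simp [pvA]
    have hlenB : ((gs2.map (fun q => q.2)).length : Int) = (gs2.length : Int) := by
      simp
    rw [hlenA, hlenB]
    by_cases hbrk : peak_num > 0 ∧ peak_num ≤ (gs2.length : Int)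
    · rw [if_pos hbrk, if_pos hbrk]
      exact ⟨gs2, h2P, rfl, rfl⟩
    · rw [if_neg hbrk, if_neg hbrk]
      exact ih hrest gs2 h2P

-- ===== VERDICT (by name: the statement is the Claim_ definition above) =====
theorem old2_zigzag_spec : Claim_equal_old2_zigzag := by
  intro ep dt h_ l size peak_num hdom hpre
  unfold Spec_old2_zigzag
  obtain ⟨hsz, hlen⟩ := hpre
  unfold old2_zigzag old2_zigzag_alt
  by_cases hsmall : (ep.length : Int) < 2*size
  · rw [if_pos hsmall]
    have hnil : PySem.List.pyRange ((ep.length : Int) - size*2 + 1) 0 (-1) = [] :=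
      PySem.List.pyRange_neg_one_eq_nil (by omega)
    rw [hnil]
    simp only [pvALoop, List.reverse_nil]
    refine Prod.ext rfl (Prod.ext rfl (Prod.ext rfl (Prod.ext rfl ?_)))
    show size*2 - 1 = 2*size - 1
    ring
  · rw [if_neg hsmall]
    obtain ⟨hdt, hhh, hll⟩ := hlen (by omega)
    obtain ⟨gs', hP, hA, hB⟩ := pvLoop_rel ep dt h_ l size peak_num hsz hhh hll
        (PySem.List.pyRange ((ep.length : Int) - size*2 + 1) 0 (-1))
        (fun j hj => by
          rw [PySem.List.mem_pyRange_neg_one] at hj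
          omega)
        [] (by intro q hq; simp at hq)
    simp only [List.map_nil] at hB
    have hpvA0 : pvA [] = ([], [], [], [], []) := rfl
    rw [hpvA0] at hA
    have hrange : ((ep.length : Int) - 2*size + 1) = ((ep.length : Int) - size*2 + 1) := by ring
    simp only [hrange, hB, hA]
    simp only [pvA, List.map_reverse, List.map_map, Function.comp]
    refine Prod.ext rfl (Prod.ext rfl (Prod.ext rfl (Prod.ext rfl ?_)))
    show size*2 - 1 = 2*size - 1
    ring
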